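-- pv_equiv track=rewrite | github.com/tcosmo/cosmix | cosmix/gsheets_integration.py | xl_rowcol_to_cell
-- ===== SOURCE A (Python) =====
-- def xl_rowcol_to_cell(row_num, col_num, absolute=False):
--     """(row,col) to Google sheets cell ID.
--     Example: (0,0) -> "A1"
--
--     If `absolute`: (0,0) -> "$A$1"
--     """
--     # Removed these 2 lines if your row, col is 1 indexed.
--     row_num += 1
--     col_num += 1
--
--     col_str = ""
--
--     while col_num:
--         remainder = col_num % 26
--
--         if remainder == 0:
--             remainder = 26
--
--         # Convert the remainder to a character.
--         col_letter = chr(ord("A") + remainder - 1)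
--
--         # Accumulate the column letters, right to left.
--         col_str = col_letter + col_str
--
--         # Get the next order of magnitude.
--         col_num = int((col_num - 1) / 26)
--
--     if not absolute:
--         return col_str + str(row_num)
--     return "$" + col_str + "$" + str(row_num)
-- ===== SOURCE B (Python) =====
-- def xl_rowcol_to_cell(row_num, col_num, absolute=False):
--     """(row,col) to Google sheets cell ID, via a recursive column-letter helper."""
--     def col_letters(n):
--         if n == 0:
--             return ""
--         # recurse on the next order of magnitude, then append this digit's letter
--         return col_letters(int((n - 1) / 26)) + chr(ord("A") + (n - 1) % 26)
--
--     prefix = "$" if absolute else ""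
--     return prefix + col_letters(col_num + 1) + prefix + str(row_num + 1)
-- ===== Notes on version B (the rewrite author's own statement) =====
-- stated objective: simpler
-- what changed: Replaces the while-loop with an accumulator and a 0->26 remainder remap by a recursive column-letter helper using the direct (n-1)%26 digit formula, and builds the absolute form with a shared '$' prefix instead of two return branches.
import Mathlib
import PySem

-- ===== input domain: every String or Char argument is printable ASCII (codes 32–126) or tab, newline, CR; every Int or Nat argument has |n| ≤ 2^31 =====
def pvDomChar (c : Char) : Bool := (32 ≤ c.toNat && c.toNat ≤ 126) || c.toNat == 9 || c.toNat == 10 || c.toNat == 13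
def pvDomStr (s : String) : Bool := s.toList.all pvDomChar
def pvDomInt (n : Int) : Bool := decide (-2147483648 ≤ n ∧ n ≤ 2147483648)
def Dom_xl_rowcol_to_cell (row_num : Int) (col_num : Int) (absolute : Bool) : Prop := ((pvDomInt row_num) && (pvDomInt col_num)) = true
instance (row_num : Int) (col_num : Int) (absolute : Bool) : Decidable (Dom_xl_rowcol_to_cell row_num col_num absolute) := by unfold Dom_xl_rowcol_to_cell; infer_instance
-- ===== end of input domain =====

-- B replaces A's accumulator while-loop by a recursive column-letter helper with the direct
-- (n-1)%26 digit formula and a shared '$' prefix string; objective: simpler, not faster.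
-- Python's int((col_num-1)/26) is float division truncated toward zero; on the domain
-- (|n| ≤ 2^31) the float quotient never rounds across an integer, so it is exactly Int.tdiv.

-- termination lemma for both ports' recursion on the shrinking column number
theorem pvNext_lt (n : Int) (h : ¬ n = 0) : ((n-1).tdiv 26).natAbs < n.natAbs := by
  by_cases h1 : 1 ≤ n
  · rw [Int.tdiv_eq_ediv_of_nonneg (by omega)]; omega
  · have h2 : (n-1).tdiv 26 = -((-(n-1)).tdiv 26) := by
      rw [Int.neg_tdiv]; ring_nf
    rw [h2, Int.tdiv_eq_ediv_of_nonneg (by omega)]; omega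

-- ===== PORT A =====
-- the while-loop: state is (col_num, col_str)
def pvALoop (col_num : Int) (col_str : String) : String :=
  if h : ¬ col_num = 0 then
    let remainder := PySem.Int.mod col_num 26
    let remainder := if remainder = 0 then 26 else remainder
    -- chr(ord("A") + remainder - 1); remainder ∈ [1,26] so toNat is exact
    let col_letter := String.singleton (Char.ofNat (65 + remainder - 1).toNat)
    pvALoop (Int.tdiv (col_num - 1) 26) (col_letter ++ col_str)  -- int((col_num-1)/26), exact on Dom
  else col_str
termination_by col_num.natAbs
decreasing_by exact pvNext_lt _ h

def xl_rowcol_to_cell (row_num : Int) (col_num : Int) (absolute : Bool) : String :=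
  let row_num := row_num + 1
  let col_num := col_num + 1
  let col_str := pvALoop col_num ""
  if !absolute then col_str ++ PySem.Int.toStr row_num
  else "$" ++ col_str ++ "$" ++ PySem.Int.toStr row_num

-- ===== PORT B =====
-- recursive helper: "" at 0, otherwise letters of the quotient then this digit's letter
def pvColLetters (n : Int) : String :=
  if h : ¬ n = 0 then
    pvColLetters (Int.tdiv (n - 1) 26)  -- int((n-1)/26), exact on Dom
      ++ String.singleton (Char.ofNat (65 + PySem.Int.mod (n - 1) 26).toNat)
  else ""
termination_by n.natAbs
decreasing_by exact pvNext_lt _ h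

def xl_rowcol_to_cell_alt (row_num : Int) (col_num : Int) (absolute : Bool) : String :=
  let pfx := if absolute then "$" else ""
  pfx ++ pvColLetters (col_num + 1) ++ pfx ++ PySem.Int.toStr (row_num + 1)

-- ===== PRECONDITION & SPEC =====
def Spec_xl_rowcol_to_cell (row_num : Int) (col_num : Int) (absolute : Bool) (out : String) : Prop := out = xl_rowcol_to_cell_alt row_num col_num absolute
instance (row_num : Int) (col_num : Int) (absolute : Bool) (out : String) : Decidable (Spec_xl_rowcol_to_cell row_num col_num absolute out) := by unfold Spec_xl_rowcol_to_cell; infer_instance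

-- ===== CLAIM (what is proved, stated in full; the proofs are below) =====
def Claim_equal_xl_rowcol_to_cell : Prop := ∀ (row_num : Int) (col_num : Int) (absolute : Bool), Dom_xl_rowcol_to_cell row_num col_num absolute → Spec_xl_rowcol_to_cell row_num col_num absolute (xl_rowcol_to_cell row_num col_num absolute)

-- ===== LEMMAS AND PROOFS =====

-- A's remapped remainder yields the same letter as B's direct (n-1) mod 26 formula
theorem pvLetter_eq (n : Int) :
    (65 + (if PySem.Int.mod n 26 = 0 then 26 else PySem.Int.mod n 26) - 1).toNat
      = (65 + PySem.Int.mod (n - 1) 26).toNat := by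
  simp only [PySem.Int.mod_eq_emod_of_pos (b := 26) (by norm_num)]
  split_ifs with h0 <;> omega

-- the loop with accumulator s computes pvColLetters n prepended to s
theorem pvALoop_eq (n : Int) (s : String) : pvALoop n s = pvColLetters n ++ s := by
  by_cases h : n = 0
  · subst h; rw [pvALoop, pvColLetters]; simp
  · rw [pvALoop, pvColLetters]
    simp only [h, not_false_iff, dif_pos]
    rw [pvALoop_eq ((n-1).tdiv 26), pvLetter_eq n, String.append_assoc]
termination_by n.natAbs
decreasing_by exact pvNext_lt _ h

-- ===== VERDICT (by name: the statement is the Claim_ definition above) =====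
theorem xl_rowcol_to_cell_spec : Claim_equal_xl_rowcol_to_cell := by
  intro row col absolute _
  unfold Spec_xl_rowcol_to_cell xl_rowcol_to_cell xl_rowcol_to_cell_alt
  cases absolute <;> simp [pvALoop_eq, String.append_assoc]
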